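-- pv_equiv track=rewrite | github.com/matt-j-harvey/Behaviour_Analysis | Create_Behaviour_Matrix_Discrimination.py | get_frame_indexes
-- ===== SOURCE A (Python) =====
-- def get_frame_indexes(frame_stream):
--     frame_indexes = {}
--     state = 1
--     threshold = 2
--     count = 0
--
--     for timepoint in range(0, len(frame_stream)):
--
--         if frame_stream[timepoint] > threshold:
--             if state == 0:
--                 state = 1
--                 frame_indexes[timepoint] = count
--                 count += 1
--
--         else:
--             if state == 1:
--                 state = 0
--             else:
--                 pass
--
--     return frame_indexes
-- ===== SOURCE B (Python) =====
-- def get_frame_indexes(frame_stream):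
--     # Scan for "low" samples (<= 2); an edge is the successor of a low that is high.
--     n = len(frame_stream)
--     lows = [j for j, v in enumerate(frame_stream) if v <= 2]
--     edges = [j + 1 for j in lows if j + 1 < n and frame_stream[j + 1] > 2]
--     return dict(zip(edges, range(len(edges))))
-- ===== Notes on version B (the rewrite author's own statement) =====
-- stated objective: alternative
-- what changed: Instead of A's fused state-machine scan (state flag, dict and counter mutated per step), B inverts the predicate: it collects the low positions (<= 2), takes each low's successor that is high as an edge (so index 0 can never be an edge, replacing A's initial-state handling), and builds the dict with dict(zip(edges, range(len(edges)))).
import Mathlib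
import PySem

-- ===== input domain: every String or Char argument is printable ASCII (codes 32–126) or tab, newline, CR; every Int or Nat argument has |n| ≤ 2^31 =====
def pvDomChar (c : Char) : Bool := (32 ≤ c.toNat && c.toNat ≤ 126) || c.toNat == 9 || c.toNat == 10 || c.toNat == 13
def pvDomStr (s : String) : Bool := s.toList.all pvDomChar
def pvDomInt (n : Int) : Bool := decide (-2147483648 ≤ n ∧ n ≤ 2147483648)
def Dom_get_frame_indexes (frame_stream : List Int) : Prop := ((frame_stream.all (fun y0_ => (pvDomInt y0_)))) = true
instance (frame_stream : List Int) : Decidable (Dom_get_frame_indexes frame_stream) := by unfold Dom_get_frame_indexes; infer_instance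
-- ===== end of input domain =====

-- B replaces A's fused state-machine scan with an inverted decomposition: collect the
-- low positions, take each low's high successor as an edge, dict via zip (alternative, same cost).


-- ===== PORT A =====
-- literal port of A: one fold over range(len) carrying (dict, state, count)
def get_frame_indexes (frame_stream : List Int) : List (Int × Int) :=
  let r := (PySem.List.pyRange 0 frame_stream.length 1).foldl
    (fun (st : PySem.Dict Int Int × Int × Int) (timepoint : Int) =>
      let (d, state, count) := st
      if PySem.List.pyGetD frame_stream timepoint 0 > 2 then
        if state = 0 then (d.insert timepoint count, 1, count + 1)
        else (d, state, count)
      else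
        if state = 1 then (d, 0, count)
        else (d, state, count))
    (PySem.Dict.empty, 1, 0)
  r.1.items

-- ===== PORT B =====
-- literal port of B: low positions, each low's high successor is an edge, dict(zip(edges, range))
def get_frame_indexes_alt (frame_stream : List Int) : List (Int × Int) :=
  let n : Int := frame_stream.length
  let lows := ((PySem.List.enumerate frame_stream).filter (fun p => decide (p.2 ≤ 2))).map (fun p => p.1)
  let edges := (lows.filter (fun j =>
      decide (j + 1 < n) && decide (PySem.List.pyGetD frame_stream (j + 1) 0 > 2))).map (fun j => j + 1)
  ((edges.zip (PySem.List.pyRange 0 edges.length 1)).foldl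
    (fun (d : PySem.Dict Int Int) p => d.insert p.1 p.2) PySem.Dict.empty).items

-- ===== PRECONDITION & SPEC =====
def Spec_get_frame_indexes (frame_stream : List Int) (out : List (Int × Int)) : Prop := out = get_frame_indexes_alt frame_stream
instance (frame_stream : List Int) (out : List (Int × Int)) : Decidable (Spec_get_frame_indexes frame_stream out) := by unfold Spec_get_frame_indexes; infer_instance

-- ===== CLAIM (what is proved, stated in full; the proofs are below) =====
def Claim_equal_get_frame_indexes : Prop := ∀ (frame_stream : List Int), Dom_get_frame_indexes frame_stream → Spec_get_frame_indexes frame_stream (get_frame_indexes frame_stream)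

-- ===== LEMMAS AND PROOFS =====

-- Nat-indexed view of the threshold test and the rising-edge predicate
def pvHi (fs : List Int) (k : Nat) : Bool := decide (2 < fs.getD k 0)

def pvEdgeN (fs : List Int) (k : Nat) : Bool :=
  pvHi fs k && !(if k = 0 then true else pvHi fs (k - 1))

-- the rising-edge indices among [0, n)
def pvEdges (fs : List Int) (n : Nat) : List Int :=
  ((List.range n).filter (pvEdgeN fs)).map (fun k => (k : Int))

-- A's state after processing indices [0, n)
def pvState (fs : List Int) (n : Nat) : Int :=
  if n = 0 then 1 else if pvHi fs (n - 1) then 1 else 0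

-- the dict A accumulates: each edge mapped to its position in the edge list
def pvBuild (edges : List Int) : PySem.Dict Int Int :=
  (PySem.List.enumerate edges).foldl
    (fun (d : PySem.Dict Int Int) p => d.insert p.2 p.1) PySem.Dict.empty

lemma pvBuild_append_singleton (edges : List Int) (t : Int) :
    pvBuild (edges ++ [t]) = (pvBuild edges).insert t (edges.length : Int) := by
  simp [pvBuild, PySem.List.enumerate_append, List.foldl_append, PySem.List.enumerate]

lemma pvEdges_succ (fs : List Int) (n : Nat) :
    pvEdges fs (n + 1)
      = pvEdges fs n ++ (if pvEdgeN fs n then [(n : Int)] else []) := by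
  simp only [pvEdges, List.range_succ, List.filter_append]
  by_cases h : pvEdgeN fs n <;> simp [h]

-- loop invariant for A's fold over range(n)
lemma pvLoopA (fs : List Int) (n : Nat) :
    (PySem.List.pyRange 0 (n : Int) 1).foldl
      (fun (st : PySem.Dict Int Int × Int × Int) (timepoint : Int) =>
        let (d, state, count) := st
        if PySem.List.pyGetD fs timepoint 0 > 2 then
          if state = 0 then (d.insert timepoint count, 1, count + 1)
          else (d, state, count)
        else
          if state = 1 then (d, 0, count)
          else (d, state, count))
      (PySem.Dict.empty, 1, 0)
    = (pvBuild (pvEdges fs n), pvState fs n, ((pvEdges fs n).length : Int)) := by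
  rw [PySem.List.pyRange_zero_natCast, List.foldl_map]
  induction n with
  | zero => simp [pvEdges, pvState, pvBuild]
  | succ n ih =>
    rw [List.range_succ, List.foldl_append, ih, List.foldl_cons, List.foldl_nil]
    have hget : PySem.List.pyGetD fs ((n : Nat) : Int) 0 = fs.getD n 0 :=
      PySem.List.pyGetD_natCast fs n 0
    by_cases hhi : pvHi fs n
    · have h2 : 2 < fs[n]?.getD 0 := by simpa [pvHi, List.getD] using hhi
      by_cases hst : pvState fs n = 0
      · -- rising edge recorded
        have hn0 : n ≠ 0 := by intro h; simp [pvState, h] at hst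
        have hprev : pvHi fs (n - 1) = false := by
          by_contra h
          simp only [Bool.not_eq_false] at h
          simp [pvState, hn0, h] at hst
        have hedge : pvEdgeN fs n = true := by simp [pvEdgeN, hhi, hn0, hprev]
        rw [pvEdges_succ, if_pos hedge, pvBuild_append_singleton]
        simp [h2, hn0, hprev, pvState, hhi]
      · -- high with state already 1: no edge
        have hedge : pvEdgeN fs n = false := by
          by_cases hn0 : n = 0
          · simp [pvEdgeN, hn0]
          · have hprev : pvHi fs (n - 1) = true := by
              by_contra h
              simp [pvState, hn0, h] at hst
            simp [pvEdgeN, hn0, hprev]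
        rw [pvEdges_succ, if_neg (by simp [hedge])]
        by_cases hn0 : n = 0
        · subst hn0
          simp [PySem.List.pyGetD_ofNat', List.getD, h2, pvState, hhi]
        · have hprev : pvHi fs (n - 1) = true := by
            by_contra h
            simp [pvState, hn0, h] at hst
          simp [h2, hn0, hprev, pvState, hhi]
    · -- low sample: no edge, state becomes (or stays) 0
      have h2 : ¬ 2 < fs[n]?.getD 0 := by simpa [pvHi, List.getD] using hhi
      have hedge : pvEdgeN fs n = false := by
        simp [pvEdgeN, Bool.eq_false_iff.2 hhi]
      rw [pvEdges_succ, if_neg (by simp [hedge])]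
      rcases eq_or_ne (pvState fs n) 1 with h1 | h1
      · by_cases hn0 : n = 0
        · subst hn0
          simp [PySem.List.pyGetD_ofNat', List.getD, h2, pvState, hhi]
        · have hprev : pvHi fs (n - 1) = true := by
            by_contra h
            simp [pvState, hn0, h] at h1
          simp [h2, hn0, hprev, pvState, hhi]
      · have hn0 : n ≠ 0 := by intro h; simp [pvState, h] at h1
        have hprev : pvHi fs (n - 1) = false := by
          by_contra h
          simp only [Bool.not_eq_false] at h
          simp [pvState, hn0, h] at h1
        simp [h2, hn0, hprev, pvState, hhi]

-- B's low-successor edge list is exactly the rising-edge list pvEdges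
lemma pvEdgesB_eq (fs : List Int) :
    (((((PySem.List.enumerate fs).filter (fun p => decide (p.2 ≤ 2))).map (fun p => p.1)).filter
        (fun j => decide (j + 1 < (fs.length : Int))
            && decide (PySem.List.pyGetD fs (j + 1) 0 > 2))).map (fun j => j + 1))
      = pvEdges fs fs.length := by
  rw [PySem.List.enumerate_eq_map_pyRange fs 0]
  simp only [PySem.List.len_eq]
  rw [PySem.List.pyRange_zero_natCast]
  simp only [List.map_map, List.filter_map, List.map_map, List.filter_filter]
  have hcong : ∀ k ∈ List.range fs.length,
      (((fun j => decide (j + 1 < (fs.length : Int)) && decide (PySem.List.pyGetD fs (j + 1) 0 > 2))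
          ∘ (fun p => p.1) ∘ (fun j => (j, PySem.List.pyGetD fs j 0)) ∘ (fun k : Nat => (k : Int))) k
       && ((fun p : Int × Int => decide (p.2 ≤ 2))
          ∘ (fun j => (j, PySem.List.pyGetD fs j 0)) ∘ (fun k : Nat => (k : Int))) k)
      = pvEdgeN fs (k + 1) := by
    intro k hk
    have hk' : k < fs.length := List.mem_range.1 hk
    have hc : ((k : Nat) : Int) + 1 = (((k + 1 : Nat)) : Int) := by push_cast; ring
    simp only [Function.comp, hc, PySem.List.pyGetD_natCast, pvEdgeN, pvHi,
      Nat.succ_ne_zero, Nat.add_sub_cancel]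
    by_cases hlt : k + 1 < fs.length
    · have h1 : (((k:Nat):Int) + 1 < (fs.length : Int)) := by exact_mod_cast hlt
      simp [h1]
      by_cases ha : 2 < fs.getD k 0 <;> by_cases hb : fs.getD (k+1) 0 > 2 <;>
        simp_all [List.getD, Bool.and_comm]
    · have hend : fs[k + 1]? = none := List.getElem?_eq_none (by omega : fs.length ≤ k + 1)
      have h1 : ¬ (((k:Nat):Int) + 1 < (fs.length : Int)) := by
        intro h; exact hlt (by exact_mod_cast h)
      simp [h1, hend, List.getD]
  rw [List.filter_congr hcong]
  -- goal: map ((+1) ∘ fst ∘ pair ∘ cast) (filter (pvEdgeN∘succ) (range n)) = pvEdges fs n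
  have h0 : pvEdgeN fs 0 = false := by simp [pvEdgeN]
  have hn : pvEdgeN fs fs.length = false := by
    simp [pvEdgeN, pvHi, List.getD_eq_getElem?_getD]
  have key : ((List.range fs.length).filter (fun k => pvEdgeN fs (k + 1))).map (fun k : Nat => ((k : Int) + 1))
      = pvEdges fs fs.length := by
    have hmap : ((List.range fs.length).map (· + 1)).filter (pvEdgeN fs)
        = ((List.range fs.length).filter (fun k => pvEdgeN fs (k + 1))).map (· + 1) := by
      rw [List.filter_map]; rfl
    have hrange : (List.range (fs.length + 1)).filter (pvEdgeN fs)
        = ((List.range fs.length).map (· + 1)).filter (pvEdgeN fs) := by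
      rw [List.range_succ_eq_map]
      simp [h0]
    have hdrop : (List.range (fs.length + 1)).filter (pvEdgeN fs)
        = (List.range fs.length).filter (pvEdgeN fs) := by
      rw [List.range_succ, List.filter_append]
      simp [hn]
    unfold pvEdges
    rw [← hdrop, hrange, hmap]
    simp
    rw [← List.map_eq_flatMap, List.map_map]
    apply List.map_congr_left
    intro k _
    simp [Function.comp]
  rw [← key]
  apply List.map_congr_left
  intro k _
  simp [Function.comp]

-- zip with range builds the same dict as enumerate
lemma pvZipBuild (edges : List Int) :
    (edges.zip (PySem.List.pyRange 0 (edges.length : Int) 1)).foldl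
      (fun (d : PySem.Dict Int Int) p => d.insert p.1 p.2) PySem.Dict.empty
    = pvBuild edges := by
  have h1 : PySem.List.pyRange 0 (edges.length : Int) 1
      = (PySem.List.enumerate edges).map (fun p => p.1) := by
    rw [PySem.List.map_fst_enumerate]; norm_num
  have h2 : edges = (PySem.List.enumerate edges).map (fun p => p.2) :=
    (PySem.List.map_snd_enumerate edges 0).symm
  have hz : ((PySem.List.enumerate edges).map (fun p => p.2)).zip
        ((PySem.List.enumerate edges).map (fun p => p.1))
      = (PySem.List.enumerate edges).map (fun p => (p.2, p.1)) := List.zip_map'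
  rw [PySem.List.map_snd_enumerate] at hz
  rw [h1, hz, List.foldl_map]
  rfl

-- ===== VERDICT (by name: the statement is the Claim_ definition above) =====
theorem get_frame_indexes_spec : Claim_equal_get_frame_indexes := by
  intro fs _
  show get_frame_indexes fs = get_frame_indexes_alt fs
  unfold get_frame_indexes get_frame_indexes_alt
  rw [pvLoopA]
  simp only [pvEdgesB_eq, pvZipBuild]
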